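-- pv_equiv track=rewrite | github.com/wolf257/L3_lingCorpus_CorpusAnalysis | code_source/modules/stats.py | dict_lettersDistribution_from_list
-- ===== SOURCE A (Python) =====
-- from collections import OrderedDict
--
-- def dict_lettersDistribution_from_list(list_word):
--     ''' Return dict lettersDistribution from a list '''
--
--     lettersDistribution = {}
--
--     for word in list_word :
--         for letter in word :
--             if letter not in lettersDistribution:
--                 lettersDistribution[letter] = 1
--             else :
--                 lettersDistribution[letter] +=1
--
--     #Retourne le dict sans ordre
--     #return lettersDistribution
--     return OrderedDict(sorted(lettersDistribution.items(), key=lambda t:t[0]))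
-- ===== SOURCE B (Python) =====
-- from collections import OrderedDict
--
-- def dict_lettersDistribution_from_list(list_word):
--     ''' Return dict lettersDistribution from a list '''
--     chars = sorted(c for word in list_word for c in word)
--     out = OrderedDict()
--     if not chars:
--         return out
--     cur, n = chars[0], 1
--     for c in chars[1:]:
--         if c == cur:
--             n += 1
--         else:
--             out[cur] = n
--             cur, n = c, 1
--     out[cur] = n
--     return out
-- ===== Notes on version B (the rewrite author's own statement) =====
-- stated objective: alternative
-- what changed: Replaces the per-character hash-dict membership/accumulation loop followed by a final sort of the items with sort-first-then-run-scan: all characters are flattened into one list, sorted, and a single linear scan over the sorted list emits (letter, run length) pairs already in key order, so no dict lookup or post-sort of items is needed.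
import Mathlib
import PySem

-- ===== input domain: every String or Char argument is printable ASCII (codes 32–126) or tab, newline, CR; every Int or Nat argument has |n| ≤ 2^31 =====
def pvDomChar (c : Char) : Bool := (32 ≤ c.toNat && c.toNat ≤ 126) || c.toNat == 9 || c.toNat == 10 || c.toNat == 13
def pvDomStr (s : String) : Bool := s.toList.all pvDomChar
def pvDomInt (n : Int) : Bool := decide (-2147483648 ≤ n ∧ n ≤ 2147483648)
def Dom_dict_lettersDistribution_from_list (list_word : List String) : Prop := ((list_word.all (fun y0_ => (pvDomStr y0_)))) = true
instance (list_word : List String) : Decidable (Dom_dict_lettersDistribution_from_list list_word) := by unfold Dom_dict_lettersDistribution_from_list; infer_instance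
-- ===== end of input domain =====

-- B replaces the per-character dict accumulation + final item sort with sort-all-characters-first
-- and a single run-length scan over the sorted characters (alternative decomposition, similar cost).

-- ===== PORT A =====
-- A: dict accumulation (letter ↦ count) over every character, then sorted items.
def dict_lettersDistribution_from_list (list_word : List String) : List (String × Int) :=
  let lettersDistribution : PySem.Dict String Int :=
    list_word.foldl (fun d word =>
      word.toList.foldl (fun d ch =>
        let letter := String.mk [ch]
        if d.contains letter = false then d.insert letter 1
        else d.insert letter (d.getD letter 0 + 1)) d) PySem.Dict.empty
  PySem.List.sorted lettersDistribution.items (fun t => t.1) false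

-- ===== PORT B =====
-- run-length scan over an already-sorted list: carries the current letter and its running count
def pvRunScan (cur : String) (n : Int) : List String → List (String × Int)
  | [] => [(cur, n)]
  | c :: rest => if c = cur then pvRunScan cur (n + 1) rest
                 else (cur, n) :: pvRunScan c 1 rest

def dict_lettersDistribution_from_list_alt (list_word : List String) : List (String × Int) :=
  let chars := PySem.List.sorted
    (list_word.flatMap (fun word => word.toList.map (fun ch => String.mk [ch])))
    (fun x => x) false
  match chars with
  | [] => []
  | c :: rest => pvRunScan c 1 rest

-- ===== PRECONDITION & SPEC =====
def Spec_dict_lettersDistribution_from_list (list_word : List String) (out : List (String × Int)) : Prop := out = dict_lettersDistribution_from_list_alt list_word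
instance (list_word : List String) (out : List (String × Int)) : Decidable (Spec_dict_lettersDistribution_from_list list_word out) := by unfold Spec_dict_lettersDistribution_from_list; infer_instance

-- ===== CLAIM (what is proved, stated in full; the proofs are below) =====
def Claim_equal_dict_lettersDistribution_from_list : Prop := ∀ (list_word : List String), Dom_dict_lettersDistribution_from_list list_word → Spec_dict_lettersDistribution_from_list list_word (dict_lettersDistribution_from_list list_word)

-- ===== LEMMAS AND PROOFS =====

lemma pv_ofList_sublist {α : Type} [BEq α] [LawfulBEq α] (xs : List α) :
    (PySem.Set.ofList xs : List α).Sublist xs := by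
  induction xs with
  | nil => simp [PySem.Set.ofList_nil]
  | cons x xs ih =>
      rw [PySem.Set.ofList_cons]
      exact List.Sublist.cons₂ x (List.filter_sublist.trans ih)

lemma pvRunScan_spec (t : List String) : ∀ (c : String) (n : Int),
    List.Pairwise (· ≤ ·) t → (∀ d ∈ t, c ≤ d) →
    pvRunScan c n t = (PySem.Set.ofList (c :: t) : List String).map
      (fun k => (k, if k = c then n + (t.count k : Int) else (t.count k : Int))) := by
  induction t with
  | nil =>
      intro c n _ _
      simp [pvRunScan, PySem.Set.ofList_cons, PySem.Set.ofList_nil, PySem.Set.discard]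
  | cons d t' ih =>
      intro c n hp hc
      rcases List.pairwise_cons.mp hp with ⟨hd, hp'⟩
      by_cases hdc : d = c
      · subst hdc
        have h1 : pvRunScan d n (d :: t') = pvRunScan d (n + 1) t' := by
          simp [pvRunScan]
        rw [h1, ih d (n + 1) hp' hd]
        have hset : (PySem.Set.ofList (d :: d :: t') : List String)
            = (PySem.Set.ofList (d :: t') : List String) := by
          simp [PySem.Set.ofList_cons, PySem.Set.discard, List.filter_filter]
        rw [hset]
        apply List.map_congr_left
        intro k hk
        by_cases hkd : k = d
        · subst hkd
          simp [List.count_cons_self]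
          omega
        · simp [hkd, Ne.symm hkd]
      · have hcd : c < d := lt_of_le_of_ne (hc d (List.mem_cons_self)) (Ne.symm hdc)
        have hct : ∀ e ∈ d :: t', c < e := by
          intro e he
          rcases List.mem_cons.mp he with rfl | he'
          · exact hcd
          · exact lt_of_lt_of_le hcd (hd e he')
        have hcnot : c ∉ d :: t' := fun h => lt_irrefl c (hct c h)
        have h1 : pvRunScan c n (d :: t') = (c, n) :: pvRunScan d 1 t' := by
          simp [pvRunScan, hdc]
        rw [h1, ih d 1 hp' hd]
        have hfix : ((PySem.Set.ofList (d :: t') : List String).filter (fun y => !(y == c)))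
            = (PySem.Set.ofList (d :: t') : List String) := by
          apply List.filter_eq_self.mpr
          intro k hk
          have hk' : k ∈ d :: t' := (PySem.Set.mem_ofList _ _).mp hk
          simp
          exact fun h => hcnot (h ▸ hk')
        have hset : (PySem.Set.ofList (c :: d :: t') : List String)
            = c :: (PySem.Set.ofList (d :: t') : List String) := by
          rw [PySem.Set.ofList_cons]
          show c :: ((PySem.Set.ofList (d :: t') : List String).filter _) = _
          rw [hfix]
        rw [hset, List.map_cons]
        have hcount0 : (d :: t').count c = 0 := List.count_eq_zero.mpr hcnot
        congr 1
        · simp [hcount0]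
        · apply List.map_congr_left
          intro k hk
          have hk' : k ∈ d :: t' := (PySem.Set.mem_ofList _ _).mp hk
          have hkc : k ≠ c := fun h => hcnot (h ▸ hk')
          by_cases hkd : k = d
          · subst hkd
            simp [hkc, List.count_cons_self]
            omega
          · simp [hkc, hkd, Ne.symm hkd]

-- A's accumulation loop is collections.Counter over the flattened one-character strings
lemma pv_dict_eq_counter (list_word : List String) :
    (list_word.foldl (fun d word =>
      word.toList.foldl (fun d ch =>
        let letter := String.mk [ch]
        if d.contains letter = false then d.insert letter 1
        else d.insert letter (d.getD letter 0 + 1)) d) PySem.Dict.empty)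
    = PySem.Dict.counter
        (list_word.flatMap (fun word => word.toList.map (fun ch => String.mk [ch]))) := by
  rw [← PySem.Dict.foldl_insert_getD_add_one_eq_counter, List.foldl_flatMap]
  congr 1
  funext d word
  rw [List.foldl_map]
  congr 1
  funext d' ch
  by_cases h : d'.contains (String.mk [ch]) = false
  · rw [if_pos h, PySem.Dict.getD_of_not_contains d' _ h]
    norm_num
  · rw [if_neg h]

-- the flattened list of one-character strings (proof abbreviation; both ports inline it)
def pvChars (list_word : List String) : List String :=
  list_word.flatMap (fun word => word.toList.map (fun ch => String.mk [ch]))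

theorem pv_main (list_word : List String) :
    dict_lettersDistribution_from_list list_word
      = dict_lettersDistribution_from_list_alt list_word := by
  unfold dict_lettersDistribution_from_list dict_lettersDistribution_from_list_alt
  rw [pv_dict_eq_counter]
  show PySem.List.sorted (PySem.Dict.counter (pvChars list_word)).items (fun t => t.1) false
      = (match PySem.List.sorted (pvChars list_word) (fun x => x) false with
         | [] => []
         | c :: rest => pvRunScan c 1 rest)
  rw [PySem.Dict.items_counter]
  have hperm : (PySem.List.sorted (pvChars list_word) (fun x => x) false).Perm (pvChars list_word) :=
    PySem.List.sorted_perm _ _ _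
  have hpair : List.Pairwise (· ≤ ·) (PySem.List.sorted (pvChars list_word) (fun x => x) false) :=
    PySem.List.sorted_pairwise _ _
  rcases hm : PySem.List.sorted (pvChars list_word) (fun x => x) false with _ | ⟨c, t⟩
  · -- no characters at all
    have hcs : pvChars list_word = [] := ((PySem.List.sorted_eq_nil_iff _ _ _).mp hm)
    rw [hcs, PySem.Set.ofList_nil, List.map_nil]
    exact (PySem.List.sorted_eq_nil_iff _ _ _).mpr rfl
  · rw [hm] at hperm hpair
    rcases List.pairwise_cons.mp hpair with ⟨hd, hp'⟩
    show _ = pvRunScan c 1 t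
    rw [pvRunScan_spec t c 1 hp' hd]
    -- the run-scan result, with counts read off the full character list
    have hys : (PySem.Set.ofList (c :: t) : List String).map
          (fun k => (k, if k = c then 1 + ((t.count k : Nat) : Int) else ((t.count k : Nat) : Int)))
        = (PySem.Set.ofList (c :: t) : List String).map
          (fun k => (k, (((pvChars list_word).count k : Nat) : Int))) := by
      apply List.map_congr_left
      intro k hk
      have hk' : k ∈ c :: t := (PySem.Set.mem_ofList _ _).mp hk
      have hcnt : (c :: t).count k = (pvChars list_word).count k := hperm.count_eq k
      by_cases hkc : k = c
      · subst hkc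
        simp only [← hcnt, List.count_cons_self, Prod.mk.injEq, true_and]
        push_cast
        ring
      · simp only [if_neg hkc, ← hcnt, Prod.mk.injEq, true_and]
        simp [Ne.symm hkc]
    rw [hys]
    refine PySem.List.sorted_eq_of_perm_of_pairwise_lt _ _ _ ?_ ?_
    · -- permutation of the counter items
      apply List.Perm.map
      apply (List.perm_ext_iff_of_nodup (PySem.Set.nodup_ofList _) (PySem.Set.nodup_ofList _)).mpr
      intro a
      rw [PySem.Set.mem_ofList, PySem.Set.mem_ofList]
      exact hperm.mem_iff
    · -- keys strictly increase along the run-scan output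
      rw [List.pairwise_map]
      have hnd : (PySem.Set.ofList (c :: t) : List String).Nodup := PySem.Set.nodup_ofList _
      have hle : (PySem.Set.ofList (c :: t) : List String).Pairwise (· ≤ ·) :=
        List.Pairwise.sublist (pv_ofList_sublist (c :: t)) hpair
      exact (hle.and hnd).imp (fun ⟨ha, hb⟩ => lt_of_le_of_ne ha hb)

-- ===== VERDICT (by name: the statement is the Claim_ definition above) =====
theorem dict_lettersDistribution_from_list_spec : Claim_equal_dict_lettersDistribution_from_list := by
  intro list_word _
  unfold Spec_dict_lettersDistribution_from_list
  exact pv_main list_word
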